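-- pv_equiv track=rewrite | github.com/m1m0r1/galgo | galgo/bioseq.py | aln2pos
-- ===== SOURCE A (Python) =====
-- from builtins import zip, range
--
-- def aln2pos(aln, offset=0, count_del=False):
--     """
--     >>> offset = 3
--     >>> aln2pos(('AAAAA' 'TTTTT' 'GGGGG' 'CCCCC'), offset=offset)
--     [3, 4, 5, 6, 7, 8, 9, 10, 11, 12, 13, 14, 15, 16, 17, 18, 19, 20, 21, 22]
--
--     >>> offset = 3
--     >>> aln2pos(('AA--AAA' 'TTTTT' 'G--GGGG' 'CCCCC'), offset=offset)
--     [3, 4, 4, 4, 5, 6, 7, 8, 9, 10, 11, 12, 13, 13, 13, 14, 15, 16, 17, 18, 19, 20, 21, 22]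
--     """
--     j = offset - 1
--     poss = []
--     for i in range(len(aln)):
--         b = aln[i]
--         if count_del or b != '-':
--             j += 1
--         poss.append(j)
--     return poss
-- ===== SOURCE B (Python) =====
-- from itertools import accumulate
--
-- def aln2pos(aln, offset=0, count_del=False):
--     incs = [1 if count_del or b != '-' else 0 for b in aln]
--     return [offset - 1 + s for s in accumulate(incs)]
-- ===== Notes on version B (the rewrite author's own statement) =====
-- stated objective: alternative
-- what changed: Replaced the single mutable running counter with a two-stage decomposition: build a 0/1 increment-flags list, then prefix-sum it with itertools.accumulate and shift by offset-1.
import Mathlib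
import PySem

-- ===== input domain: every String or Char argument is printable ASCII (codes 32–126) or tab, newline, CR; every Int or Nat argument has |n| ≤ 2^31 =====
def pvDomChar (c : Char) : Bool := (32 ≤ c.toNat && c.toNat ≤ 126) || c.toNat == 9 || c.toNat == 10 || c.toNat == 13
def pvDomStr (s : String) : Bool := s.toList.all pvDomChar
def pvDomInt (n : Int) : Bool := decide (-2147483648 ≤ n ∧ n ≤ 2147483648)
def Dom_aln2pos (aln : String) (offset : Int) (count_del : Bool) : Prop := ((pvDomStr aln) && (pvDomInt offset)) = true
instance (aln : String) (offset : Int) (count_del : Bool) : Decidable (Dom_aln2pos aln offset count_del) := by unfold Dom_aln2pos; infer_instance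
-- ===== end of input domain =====

-- ===== PORT A =====
-- B: flags + accumulate (prefix sum) decomposition instead of a mutable running counter (objective: alternative).
-- loop: for each base, bump j when counted, append j
def aln2posLoop (cs : List Char) (j : Int) (count_del : Bool) : List Int :=
  match cs with
  | [] => []
  | b :: rest =>
    let j' := if count_del || b != '-' then j + 1 else j
    j' :: aln2posLoop rest j' count_del

def aln2pos (aln : String) (offset : Int) (count_del : Bool) : List Int :=
  aln2posLoop aln.toList (offset - 1) count_del

-- ===== PORT B =====
-- itertools.accumulate (running sums, no initial element)
def pyAccumulate (acc : Int) : List Int → List Int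
  | [] => []
  | x :: xs => (acc + x) :: pyAccumulate (acc + x) xs

def aln2pos_alt (aln : String) (offset : Int) (count_del : Bool) : List Int :=
  let incs := aln.toList.map (fun b => if count_del || b != '-' then (1 : Int) else 0)
  (pyAccumulate 0 incs).map (fun s => offset - 1 + s)

-- ===== PRECONDITION & SPEC =====
def Spec_aln2pos (aln : String) (offset : Int) (count_del : Bool) (out : List Int) : Prop := out = aln2pos_alt aln offset count_del
instance (aln : String) (offset : Int) (count_del : Bool) (out : List Int) : Decidable (Spec_aln2pos aln offset count_del out) := by unfold Spec_aln2pos; infer_instance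

-- ===== CLAIM (what is proved, stated in full; the proofs are below) =====
def Claim_equal_aln2pos : Prop := ∀ (aln : String) (offset : Int) (count_del : Bool), Dom_aln2pos aln offset count_del → Spec_aln2pos aln offset count_del (aln2pos aln offset count_del)

-- ===== LEMMAS AND PROOFS =====

-- ===== VERDICT (by name: the statement is the Claim_ definition above) =====
theorem accumulate_map_eq_loop (cs : List Char) (d : Bool) :
    ∀ (a j : Int),
      (pyAccumulate a (cs.map (fun b => if d || b != '-' then (1 : Int) else 0))).map
        (fun s => j + s) = aln2posLoop cs (j + a) d := by
  induction cs with
  | nil => intro a j; simp [pyAccumulate, aln2posLoop]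
  | cons b rest ih =>
    intro a j
    simp only [List.map_cons, pyAccumulate, aln2posLoop]
    by_cases h : (d || b != '-') = true
    · simp only [if_pos h]
      rw [ih (a + 1) j, add_assoc]
    · simp only [if_neg h, add_zero]
      rw [ih a j]

theorem aln2pos_spec : Claim_equal_aln2pos := by
  intro aln offset count_del _
  unfold Spec_aln2pos aln2pos aln2pos_alt
  rw [accumulate_map_eq_loop aln.toList count_del 0 (offset - 1)]
  norm_num
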